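-- pv_equiv track=rewrite | github.com/jandovjak/advent-of-code-2023 | day5/day5_part2.py | splitted_source
-- ===== SOURCE A (Python) =====
-- def splitted_source(points, source):
--     splitted_source = []
--     for i in range(len(points) - 1):
--         new_point = points[i]
--         new_range = points[i + 1] - points[i]
--         for start, start_range in source:
--             if start <= new_point < start + start_range:
--                 splitted_source.append((new_point, new_range))
--     return splitted_source
-- ===== SOURCE B (Python) =====
-- def _bisect_right(a, x):
--     lo, hi = 0, len(a)
--     while lo < hi:
--         mid = (lo + hi) // 2
--         if x < a[mid]:
--             hi = mid
--         else:
--             lo = mid + 1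
--     return lo
--
--
-- def splitted_source(points, source):
--     starts = sorted(s for s, r in source if r > 0)
--     ends = sorted(s + r for s, r in source if r > 0)
--     out = []
--     for p, q in zip(points, points[1:]):
--         c = _bisect_right(starts, p) - _bisect_right(ends, p)
--         out += [(p, q - p)] * c
--     return out
-- ===== Notes on version B (the rewrite author's own statement) =====
-- stated objective: faster
-- what changed: Instead of scanning all of source for every consecutive point pair, B sorts the starts and ends of the positive-length intervals once and counts the containers of each point as a difference of two hand-written binary searches, appending that many copies of the pair.
import Mathlib
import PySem

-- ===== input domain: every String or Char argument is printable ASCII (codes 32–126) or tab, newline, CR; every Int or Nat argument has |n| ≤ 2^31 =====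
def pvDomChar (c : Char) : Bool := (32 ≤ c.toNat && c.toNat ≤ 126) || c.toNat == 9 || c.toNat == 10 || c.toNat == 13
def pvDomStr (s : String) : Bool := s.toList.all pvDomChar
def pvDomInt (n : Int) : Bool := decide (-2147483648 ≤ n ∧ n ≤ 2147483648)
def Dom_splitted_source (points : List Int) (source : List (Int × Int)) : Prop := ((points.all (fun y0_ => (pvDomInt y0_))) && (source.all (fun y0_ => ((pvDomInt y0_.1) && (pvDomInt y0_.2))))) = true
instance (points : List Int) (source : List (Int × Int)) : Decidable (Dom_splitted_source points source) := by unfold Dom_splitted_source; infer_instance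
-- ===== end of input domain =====

-- B replaces A's per-point linear scan of `source` by two sorted lists of interval
-- starts/ends and a hand-written binary search per point (same return value, fewer comparisons per point).

-- ===== PORT A =====
def splitted_source (points : List Int) (source : List (Int × Int)) : List (Int × Int) :=
  (PySem.List.pyRange 0 ((points.length : Int) - 1) 1).foldl (fun acc i =>
    let new_point := PySem.List.pyGetD points i 0
    let new_range := PySem.List.pyGetD points (i + 1) 0 - PySem.List.pyGetD points i 0
    source.foldl (fun acc2 sr =>
      if sr.1 ≤ new_point ∧ new_point < sr.1 + sr.2 then acc2 ++ [(new_point, new_range)]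
      else acc2) acc) []

-- ===== PORT B =====
-- the while-loop of Source B's _bisect_right; lo and hi stay within 0..len(a),
-- so Nat arithmetic and Nat division coincide exactly with Python's ints and '//' here
def pvBisectRight (a : List Int) (x : Int) (lo hi : Nat) : Nat :=
  if _h : lo < hi then
    let mid := (lo + hi) / 2
    if x < a.getD mid 0 then pvBisectRight a x lo mid
    else pvBisectRight a x (mid + 1) hi
  else lo
termination_by hi - lo
decreasing_by all_goals omega

def splitted_source_alt (points : List Int) (source : List (Int × Int)) : List (Int × Int) :=
  let starts := PySem.List.sorted ((source.filter (fun sr => decide (0 < sr.2))).map (·.1)) id false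
  let ends := PySem.List.sorted ((source.filter (fun sr => decide (0 < sr.2))).map (fun sr => sr.1 + sr.2)) id false
  -- zip(points, points[1:]): the slice [1:] of a list is its drop 1 (exact)
  (points.zip (points.drop 1)).foldl (fun acc pq =>
    let c : Int := (pvBisectRight starts pq.1 0 starts.length : Int)
                 - (pvBisectRight ends pq.1 0 ends.length : Int)
    acc ++ PySem.List.pyRepeat [(pq.1, pq.2 - pq.1)] c) []

-- ===== PRECONDITION & SPEC =====
def Spec_splitted_source (points : List Int) (source : List (Int × Int)) (out : List (Int × Int)) : Prop := out = splitted_source_alt points source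
instance (points : List Int) (source : List (Int × Int)) (out : List (Int × Int)) : Decidable (Spec_splitted_source points source out) := by unfold Spec_splitted_source; infer_instance

-- ===== CLAIM (what is proved, stated in full; the proofs are below) =====
def Claim_equal_splitted_source : Prop := ∀ (points : List Int) (source : List (Int × Int)), Dom_splitted_source points source → Spec_splitted_source points source (splitted_source points source)

-- ===== LEMMAS AND PROOFS =====

-- countP of a list whose first k positions satisfy p and whose others do not is k
theorem pv_countP_eq_of_split (a : List Int) (p : Int → Bool) (k : Nat) (hk : k ≤ a.length)
    (h1 : ∀ i (h : i < a.length), i < k → p a[i]) (h2 : ∀ i (h : i < a.length), k ≤ i → ¬ p a[i]) :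
    a.countP p = k := by
  have hsplit : a = a.take k ++ a.drop k := (List.take_append_drop k a).symm
  rw [hsplit, List.countP_append]
  have ht : (a.take k).countP p = k := by
    rw [List.countP_eq_length.2, List.length_take, Nat.min_eq_left hk]
    intro x hx
    obtain ⟨i, hi, rfl⟩ := List.mem_iff_getElem.1 hx
    have hlen : i < min k a.length := by simpa [List.length_take] using hi
    have hi' : i < k := by omega
    rw [List.getElem_take]
    exact h1 i (by omega) hi'
  have hd : (a.drop k).countP p = 0 := by
    rw [List.countP_eq_zero]
    intro x hx
    obtain ⟨i, hi, rfl⟩ := List.mem_iff_getElem.1 hx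
    rw [List.getElem_drop]
    exact h2 (k + i) (by simp [List.length_drop] at hi; omega) (by omega)
  omega

theorem pvBisectRight_lt (a : List Int) (x : Int) (lo hi : Nat) (h : lo < hi) :
    pvBisectRight a x lo hi = if x < a.getD ((lo + hi) / 2) 0 then pvBisectRight a x lo ((lo + hi) / 2)
      else pvBisectRight a x ((lo + hi) / 2 + 1) hi := by
  rw [pvBisectRight, dif_pos h]

theorem pvBisectRight_gt (a : List Int) (x : Int) (lo hi : Nat) (h : ¬ lo < hi) :
    pvBisectRight a x lo hi = lo := by
  rw [pvBisectRight, dif_neg h]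

-- binary-search loop correctness on a sorted list: it computes the count of elements ≤ x
theorem pvBisectRight_eq_countP (a : List Int) (x : Int)
    (hs : a.Pairwise (· ≤ ·)) (lo hi : Nat) (hlh : lo ≤ hi) (hh : hi ≤ a.length)
    (h1 : ∀ i (h : i < a.length), i < lo → a[i] ≤ x)
    (h2 : ∀ i (h : i < a.length), hi ≤ i → x < a[i]) :
    pvBisectRight a x lo hi = a.countP (fun y => decide (y ≤ x)) := by
  have hmono : ∀ i j (hi' : i < a.length) (hj : j < a.length), i ≤ j → a[i] ≤ a[j] := by
    intro i j hi' hj hij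
    rcases Nat.lt_or_ge i j with h | h
    · exact List.pairwise_iff_getElem.1 hs i j hi' hj h
    · have : i = j := by omega
      subst this; rfl
  induction lo, hi using pvBisectRight.induct a x with
  | case1 lo hi hlt mid hxlt ih =>
    have hxlt' : x < a.getD ((lo + hi) / 2) 0 := hxlt
    rw [pvBisectRight_lt a x lo hi hlt, if_pos hxlt']
    have hmid : mid < hi := by omega
    have := ih (by omega) (by omega) h1 ?_
    · simpa [mid] using this
    intro i h hmi
    have hm : mid < a.length := by omega
    have : a[mid] ≤ a[i] := hmono mid i hm h hmi
    have hx : x < a.getD mid 0 := hxlt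
    rw [List.getD_eq_getElem a 0 hm] at hx
    omega
  | case2 lo hi hlt mid hxge ih =>
    have hxge' : ¬ x < a.getD ((lo + hi) / 2) 0 := hxge
    rw [pvBisectRight_lt a x lo hi hlt, if_neg hxge']
    have hmid : mid < hi := by omega
    have hm : mid < a.length := by omega
    have := ih (by omega) hh ?_ h2
    · simpa [mid] using this
    intro i h hi'
    have hle : a[i] ≤ a[mid] := hmono i mid h hm (by omega)
    have hx : ¬ x < a.getD mid 0 := hxge
    rw [List.getD_eq_getElem a 0 hm] at hx
    omega
  | case3 lo hi hge =>
    rw [pvBisectRight_gt a x lo hi hge]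
    have hk : lo = hi := by omega
    subst hk
    exact (pv_countP_eq_of_split a _ lo (by omega)
      (fun i h hik => by simpa using h1 i h hik)
      (fun i h hik => by simpa using Int.not_le.2 (h2 i h hik))).symm

-- count of positive-length intervals starting at ≤ p minus those ending at ≤ p
-- equals A's containment count (stated over Int, so no truncation)
theorem pv_count_identity (source : List (Int × Int)) (p : Int) :
    (((source.filter (fun sr => decide (0 < sr.2))).countP (fun s => decide (s.1 ≤ p)) : Int)
     - ((source.filter (fun sr => decide (0 < sr.2))).countP (fun s => decide (s.1 + s.2 ≤ p)) : Int))
    = (source.countP (fun sr => decide (sr.1 ≤ p ∧ p < sr.1 + sr.2)) : Int) := by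
  induction source with
  | nil => simp
  | cons sr rest ih =>
    simp only [Bool.decide_and] at ih
    simp only [List.filter_cons, List.countP_cons]
    by_cases h0 : 0 < sr.2 <;> by_cases h1 : sr.1 ≤ p <;> by_cases h2 : sr.1 + sr.2 ≤ p <;>
      simp [h0, h1, h2, Bool.decide_and] <;> omega

theorem pv_bisect_sorted (l : List Int) (p : Int) :
    pvBisectRight (PySem.List.sorted l id false) p 0 (PySem.List.sorted l id false).length
      = l.countP (fun y => decide (y ≤ p)) := by
  have hs : (PySem.List.sorted l id false).Pairwise (· ≤ ·) := by
    simpa using PySem.List.sorted_pairwise l id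
  rw [pvBisectRight_eq_countP _ _ hs 0 _ (Nat.zero_le _) le_rfl
      (fun i h hik => by omega) (fun i h hik => by omega)]
  exact (PySem.List.sorted_perm l id false).countP_eq _

-- per point, B's bisect difference counts exactly A's matching intervals
theorem pv_key (source : List (Int × Int)) (p : Int) :
    ((pvBisectRight (PySem.List.sorted ((source.filter (fun sr => decide (0 < sr.2))).map (·.1)) id false) p 0
        (PySem.List.sorted ((source.filter (fun sr => decide (0 < sr.2))).map (·.1)) id false).length : Int)
     - (pvBisectRight (PySem.List.sorted ((source.filter (fun sr => decide (0 < sr.2))).map (fun sr => sr.1 + sr.2)) id false) p 0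
        (PySem.List.sorted ((source.filter (fun sr => decide (0 < sr.2))).map (fun sr => sr.1 + sr.2)) id false).length : Int))
    = (source.countP (fun sr => decide (sr.1 ≤ p ∧ p < sr.1 + sr.2)) : Int) := by
  rw [pv_bisect_sorted, pv_bisect_sorted, List.countP_map, List.countP_map,
    ← pv_count_identity source p]
  rfl

theorem pv_zip_eq_range (points : List Int) :
    points.zip (points.drop 1)
      = (List.range (points.length - 1)).map (fun k => (points.getD k 0, points.getD (k + 1) 0)) := by
  apply List.ext_getElem
  · simp [List.length_zip]
  · intro i h1 h2
    have hi : i + 1 < points.length := by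
      simp [List.length_zip] at h1; omega
    have e1 : points[i]? = some (points[i]'(by omega)) := List.getElem?_eq_getElem (by omega)
    have e2 : points[i + 1]? = some (points[i + 1]'hi) := List.getElem?_eq_getElem hi
    simp [List.getElem_zip, List.getElem_map, List.getElem_range, e1, e2]

-- A in indexed closed form: for each consecutive pair, one replicated block
theorem pv_A_eq (points : List Int) (source : List (Int × Int)) :
    splitted_source points source
      = (List.range (points.length - 1)).flatMap (fun k =>
          List.replicate (source.countP (fun sr => decide (sr.1 ≤ points.getD k 0 ∧ points.getD k 0 < sr.1 + sr.2)))
            (points.getD k 0, points.getD (k + 1) 0 - points.getD k 0)) := by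
  unfold splitted_source
  simp only [PySem.List.foldl_append_ite, PySem.List.foldl_append_eq_flatMap, List.nil_append]
  rw [PySem.List.pyRange_one, List.flatMap_map]
  have ht : (((points.length : Int) - 1) - 0).toNat = points.length - 1 := by omega
  rw [ht]
  congr 1
  funext k
  have h1 : ((k : Nat) : Int) + 1 = (((k + 1 : Nat)) : Int) := by push_cast; omega
  simp only [zero_add]
  rw [h1, PySem.List.pyGetD_natCast, PySem.List.pyGetD_natCast,
    List.map_const', List.countP_eq_length_filter]

-- B in the same indexed closed form
theorem pv_B_eq (points : List Int) (source : List (Int × Int)) :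
    splitted_source_alt points source
      = (List.range (points.length - 1)).flatMap (fun k =>
          List.replicate (source.countP (fun sr => decide (sr.1 ≤ points.getD k 0 ∧ points.getD k 0 < sr.1 + sr.2)))
            (points.getD k 0, points.getD (k + 1) 0 - points.getD k 0)) := by
  unfold splitted_source_alt
  simp only [PySem.List.pyRepeat_singleton, PySem.List.foldl_append_eq_flatMap, List.nil_append]
  rw [pv_zip_eq_range, List.flatMap_map]
  congr 1
  funext k
  rw [pv_key source (points.getD k 0), Int.toNat_natCast]

-- ===== VERDICT (by name: the statement is the Claim_ definition above) =====
theorem splitted_source_spec : Claim_equal_splitted_source := by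
  intro points source _
  unfold Spec_splitted_source
  rw [pv_A_eq, pv_B_eq]
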